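-- pv_equiv track=rewrite | github.com/ratnaparkhivivek10/cg_codility_solutions | prob1_solution.py | solution
-- ===== SOURCE A (Python) =====
-- from itertools import combinations_with_replacement as cwr
--
-- def solution(arr):
--     for i, j in cwr(range(len(arr)), 2):
--         new_arr = arr[:]
--         new_arr[i], new_arr[j] = new_arr[j], new_arr[i]
--         if new_arr == sorted(arr):
--             return True
--             break
--
--     else:
--         return False
-- ===== SOURCE B (Python) =====
-- def solution(arr):
--     s = sorted(arr)
--     d = sum(1 for x, y in zip(arr, s) if x != y)
--     return d == 0 or d == 2
-- ===== Notes on version B (the rewrite author's own statement) =====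
-- stated objective: faster
-- what changed: Replaced the brute-force scan over all O(n^2) index pairs (each building a copy, swapping, and re-sorting to compare) by sorting once and counting positions where the array disagrees with its sorted form: sortable by one swap iff that count is 0 or 2.
-- intended difference: On the empty list A returns False (its for-else falls through because there are no index pairs), while B returns True; an empty array is already sorted, so True is the intended answer. — e.g. on solution([]): A returns false, B returns true
import Mathlib
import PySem

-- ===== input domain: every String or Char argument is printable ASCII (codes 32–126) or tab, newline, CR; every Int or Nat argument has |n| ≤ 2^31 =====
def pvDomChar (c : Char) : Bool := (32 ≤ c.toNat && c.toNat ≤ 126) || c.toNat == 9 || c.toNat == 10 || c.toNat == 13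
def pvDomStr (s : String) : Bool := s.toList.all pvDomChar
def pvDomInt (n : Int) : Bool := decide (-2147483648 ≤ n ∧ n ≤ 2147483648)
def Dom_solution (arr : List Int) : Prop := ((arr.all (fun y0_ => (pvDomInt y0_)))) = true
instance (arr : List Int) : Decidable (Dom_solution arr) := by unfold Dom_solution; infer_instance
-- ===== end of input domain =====

-- B replaces A's brute-force scan over all index pairs (copy, swap, re-sort, compare)
-- by sorting once and counting mismatched positions (one-swap-sortable iff 0 or 2);
-- objective: faster. On the empty list A's for-else returns False; B returns True (see D_).

-- ===== PORT A =====
-- new_arr = arr[:]; new_arr[i], new_arr[j] = new_arr[j], new_arr[i]  (RHS read from the copy of arr first)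
def pvSwap (l : List Int) (i j : Nat) : List Int :=
  (l.set i (l.getD j 0)).set j (l.getD i 0)

-- for i, j in cwr(range(len(arr)), 2): pairs (i, j) with i ≤ j < n in lexicographic order
def solution (arr : List Int) : Bool :=
  let n := arr.length
  ((List.range n).flatMap (fun i => (List.range' i (n - i)).map (fun j => (i, j)))).any
    (fun p => pvSwap arr p.1 p.2 == PySem.List.sorted arr (fun x => x) false)

-- ===== PORT B =====
def solution_alt (arr : List Int) : Bool :=
  let s := PySem.List.sorted arr (fun x => x) false
  let d := (arr.zip s).countP (fun p => p.1 != p.2)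
  d == 0 || d == 2

-- ===== PRECONDITION & SPEC =====
-- On the empty list A returns False (its for-else falls through: there are no index
-- pairs), while B returns True; an empty array is already sorted, so True is intended.
def D_solution (arr : List Int) : Prop := arr = []
instance (arr : List Int) : Decidable (D_solution arr) := by unfold D_solution; infer_instance

def Spec_solution (arr : List Int) (out : Bool) : Prop := ¬ D_solution arr → out = solution_alt arr
instance (arr : List Int) (out : Bool) : Decidable (Spec_solution arr out) := by unfold Spec_solution; infer_instance

def pvDiffWitness_solution : List Int := ([])
def pvDiffWitnessOut_solution : Bool × Bool := (false, true)

-- ===== CLAIM (what is proved, stated in full; the proofs are below) =====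
def Claim_unchanged_solution : Prop := ∀ (arr : List Int), Dom_solution arr → Spec_solution arr (solution arr)
def Claim_changed_solution : Prop := Dom_solution (pvDiffWitness_solution) ∧ D_solution (pvDiffWitness_solution) ∧ solution (pvDiffWitness_solution) = pvDiffWitnessOut_solution.1 ∧ solution_alt (pvDiffWitness_solution) = pvDiffWitnessOut_solution.2 ∧ pvDiffWitnessOut_solution.1 ≠ pvDiffWitnessOut_solution.2
def Claim_exact_solution : Prop := ∀ (arr : List Int), Dom_solution arr → D_solution arr → solution arr ≠ solution_alt arr

-- ===== LEMMAS AND PROOFS =====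

-- indices where a and b disagree
def diffIdx (a b : List Int) : List Nat :=
  (List.range a.length).filter (fun k => a.getD k 0 != b.getD k 0)

theorem mem_diffIdx {a b : List Int} {k : Nat} :
    k ∈ diffIdx a b ↔ k < a.length ∧ a.getD k 0 ≠ b.getD k 0 := by
  simp [diffIdx, List.mem_filter, List.mem_range]

theorem nodup_diffIdx (a b : List Int) : (diffIdx a b).Nodup :=
  (List.nodup_range).filter _

theorem pairwise_diffIdx (a b : List Int) : (diffIdx a b).Pairwise (· < ·) :=
  (List.pairwise_lt_range).filter _

-- lists agreeing at every position (with equal lengths) are equal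
theorem eq_of_agree {a b : List Int} (hl : b.length = a.length)
    (h : ∀ k, k < a.length → a.getD k 0 = b.getD k 0) : a = b := by
  apply List.ext_getElem (by omega)
  intro k h1 h2
  have := h k h1
  rwa [List.getD_eq_getElem a 0 h1, List.getD_eq_getElem b 0 h2] at this

theorem take_eq_of_agree {a b : List Int} (hl : b.length = a.length) {p : Nat} (hpn : p ≤ a.length)
    (h : ∀ k, k < p → a.getD k 0 = b.getD k 0) : a.take p = b.take p := by
  apply List.ext_getElem (by simp; omega)
  intro k h1 h2
  simp only [List.getElem_take]
  simp at h1
  have := h k (by omega)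
  rwa [List.getD_eq_getElem a 0 (by omega), List.getD_eq_getElem b 0 (by omega)] at this

theorem drop_eq_of_agree {a b : List Int} (hl : b.length = a.length) {p : Nat}
    (h : ∀ k, p ≤ k → k < a.length → a.getD k 0 = b.getD k 0) : a.drop p = b.drop p := by
  apply List.ext_getElem (by simp; omega)
  intro k h1 h2
  simp only [List.getElem_drop]
  simp at h1
  have := h (p + k) (by omega) (by omega)
  rwa [List.getD_eq_getElem a 0 (by omega), List.getD_eq_getElem b 0 (by omega)] at this

theorem decomp_one (a : List Int) {p : Nat} (hpn : p < a.length) :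
    a = a.take p ++ a.getD p 0 :: a.drop (p + 1) := by
  conv_lhs => rw [← List.take_append_drop p a, List.drop_eq_getElem_cons hpn]
  rw [List.getD_eq_getElem a 0 hpn]

theorem cancel_one {t d : List Int} {x y : Int}
    (hc : ∀ z, (t ++ x :: d).count z = (t ++ y :: d).count z) : x = y := by
  have := hc x
  simp only [List.count_append, List.count_cons, beq_iff_eq] at this
  by_cases hxy : y = x
  · exact hxy.symm
  · simp [hxy] at this

-- a single disagreement position is impossible between a list and a permutation of it
theorem single_diff {a b : List Int} (hl : b.length = a.length) (hp : a.Perm b)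
    {p : Nat} (hpn : p < a.length)
    (h : ∀ k, k < a.length → k ≠ p → a.getD k 0 = b.getD k 0) :
    a.getD p 0 = b.getD p 0 := by
  have htake : a.take p = b.take p :=
    take_eq_of_agree hl (by omega) (fun k hk => h k (by omega) (by omega))
  have hdrop : a.drop (p+1) = b.drop (p+1) :=
    drop_eq_of_agree hl (fun k hk1 hk2 => h k (by omega) (by omega))
  apply cancel_one (t := a.take p) (d := a.drop (p+1))
  intro z
  rw [← decomp_one a hpn]
  conv_rhs => rw [htake, hdrop, ← decomp_one b (by omega)]
  exact hp.count_eq z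

theorem decomp_two (a : List Int) {p q : Nat} (hpq : p < q) (hq : q < a.length) :
    a = a.take p ++ a.getD p 0 :: ((a.drop (p+1)).take (q - (p+1)) ++ a.getD q 0 :: a.drop (q+1)) := by
  conv_lhs => rw [decomp_one a (show p < a.length by omega)]
  congr 2
  conv_lhs => rw [← List.take_append_drop (q - (p+1)) (a.drop (p+1))]
  congr 1
  rw [List.drop_drop]
  have hqe : p + 1 + (q - (p+1)) = q := by omega
  rw [hqe, List.drop_eq_getElem_cons hq, List.getD_eq_getElem a 0 hq]

theorem cancel_two {t m d : List Int} {x y u v : Int}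
    (hc : ∀ z, (t ++ x :: (m ++ y :: d)).count z = (t ++ u :: (m ++ v :: d)).count z)
    (_hxu : x ≠ u) (hyv : y ≠ v) : x = v ∧ y = u := by
  have h1 := hc x
  have h2 := hc y
  simp only [List.count_append, List.count_cons, beq_iff_eq] at h1 h2
  split_ifs at h1 h2 <;> omega

theorem mid_eq_of_agree {a b : List Int} (hl : b.length = a.length) {p q : Nat}
    (hpq : p < q) (hq : q < a.length)
    (h : ∀ k, k < a.length → k ≠ p → k ≠ q → a.getD k 0 = b.getD k 0) :
    (a.drop (p+1)).take (q - (p+1)) = (b.drop (p+1)).take (q - (p+1)) := by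
  apply List.ext_getElem (by simp; omega)
  intro k h1 h2
  simp only [List.getElem_take, List.getElem_drop]
  simp at h1
  have := h (p + 1 + k) (by omega) (by omega) (by omega)
  rwa [List.getD_eq_getElem a 0 (by omega), List.getD_eq_getElem b 0 (by omega)] at this

-- the two disagreement positions of a permutation cross over
theorem double_diff {a b : List Int} (hl : b.length = a.length) (hp : a.Perm b)
    {p q : Nat} (hpq : p < q) (hq : q < a.length)
    (h : ∀ k, k < a.length → k ≠ p → k ≠ q → a.getD k 0 = b.getD k 0)
    (hdp : a.getD p 0 ≠ b.getD p 0) (hdq : a.getD q 0 ≠ b.getD q 0) :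
    a.getD p 0 = b.getD q 0 ∧ a.getD q 0 = b.getD p 0 := by
  have htake : a.take p = b.take p :=
    take_eq_of_agree hl (by omega) (fun k hk => h k (by omega) (by omega) (by omega))
  have hdrop : a.drop (q+1) = b.drop (q+1) :=
    drop_eq_of_agree hl (fun k hk1 hk2 => h k (by omega) (by omega) (by omega))
  have hmid := mid_eq_of_agree hl hpq hq h
  apply cancel_two (t := a.take p) (m := (a.drop (p+1)).take (q - (p+1))) (d := a.drop (q+1))
    _ hdp hdq
  intro z
  rw [← decomp_two a hpq hq]
  conv_rhs => rw [htake, hmid, hdrop, ← decomp_two b hpq (by omega)]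
  exact hp.count_eq z

theorem zip_eq_map_range (a b : List Int) (hl : b.length = a.length) :
    a.zip b = (List.range a.length).map (fun k => (a.getD k 0, b.getD k 0)) := by
  apply List.ext_getElem (by simp [hl])
  intro k h1 h2
  simp only [List.getElem_zip, List.getElem_map, List.getElem_range]
  simp at h1
  rw [List.getD_eq_getElem a 0 (by omega), List.getD_eq_getElem b 0 (by omega)]

theorem zip_countP (arr : List Int) :
    ((arr.zip (PySem.List.sorted arr (fun x => x) false)).countP (fun p => p.1 != p.2))
      = (diffIdx arr (PySem.List.sorted arr (fun x => x) false)).length := by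
  rw [zip_eq_map_range _ _ (PySem.List.length_sorted ..), List.countP_map,
    diffIdx, ← List.countP_eq_length_filter]
  rfl

theorem mem_pairs {n i j : Nat} :
    (i, j) ∈ (List.range n).flatMap (fun i => (List.range' i (n - i)).map (fun j => (i, j)))
      ↔ i ≤ j ∧ j < n := by
  simp only [List.mem_flatMap, List.mem_range, List.mem_map, List.mem_range'_1, Prod.mk.injEq]
  constructor
  · rintro ⟨x, hx, y, ⟨hy1, hy2⟩, rfl, rfl⟩; omega
  · rintro ⟨hij, hjn⟩; exact ⟨i, by omega, j, ⟨hij, by omega⟩, rfl, rfl⟩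

theorem solution_true_iff (arr : List Int) :
    solution arr = true ↔ ∃ i j, i ≤ j ∧ j < arr.length ∧
      pvSwap arr i j = PySem.List.sorted arr (fun x => x) false := by
  show (_root_.solution arr) = true ↔ _
  rw [solution, List.any_eq_true]
  constructor
  · rintro ⟨⟨i, j⟩, hm, hf⟩
    exact ⟨i, j, (mem_pairs.mp hm).1, (mem_pairs.mp hm).2, by simpa using hf⟩
  · rintro ⟨i, j, h1, h2, hf⟩
    exact ⟨(i, j), mem_pairs.mpr ⟨h1, h2⟩, by simpa using hf⟩

theorem alt_true_iff (arr : List Int) :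
    solution_alt arr = true ↔
      (diffIdx arr (PySem.List.sorted arr (fun x => x) false)).length = 0 ∨
      (diffIdx arr (PySem.List.sorted arr (fun x => x) false)).length = 2 := by
  rw [solution_alt]
  simp only [zip_countP, Bool.or_eq_true, beq_iff_eq]

theorem getD_pvSwap_ne {l : List Int} {i j k : Nat} (hi : i ≠ k) (hj : j ≠ k) :
    (pvSwap l i j).getD k 0 = l.getD k 0 := by
  simp [pvSwap, List.getD, List.getElem?_set_ne hj, List.getElem?_set_ne hi]

theorem main_ne (arr : List Int) (h : arr ≠ []) : solution arr = solution_alt arr := by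
  have hl : (PySem.List.sorted arr (fun x => x) false).length = arr.length :=
    PySem.List.length_sorted ..
  have hperm : arr.Perm (PySem.List.sorted arr (fun x => x) false) :=
    (PySem.List.sorted_perm ..).symm
  rw [Bool.eq_iff_iff, solution_true_iff, alt_true_iff]
  set s := PySem.List.sorted arr (fun x => x) false with hs
  constructor
  · rintro ⟨i, j, hij, hjn, hsw⟩
    have hsub : diffIdx arr s ⊆ [i, j] := by
      intro k hk
      rw [mem_diffIdx] at hk
      by_contra hcon
      simp only [List.mem_cons, List.not_mem_nil, or_false, not_or] at hcon
      exact hk.2 (by rw [← hsw, getD_pvSwap_ne (Ne.symm hcon.1) (Ne.symm hcon.2)])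
    have hle : (diffIdx arr s).length ≤ 2 := by
      simpa using (List.subperm_of_subset (nodup_diffIdx arr s) hsub).length_le
    have hne1 : (diffIdx arr s).length ≠ 1 := by
      intro h1
      obtain ⟨p, hpD⟩ := List.length_eq_one_iff.mp h1
      have hpm : p ∈ diffIdx arr s := by rw [hpD]; simp
      rw [mem_diffIdx] at hpm
      refine hpm.2 (single_diff (by omega) hperm hpm.1 ?_)
      intro k hk hkp
      by_contra hne
      have : k ∈ diffIdx arr s := mem_diffIdx.mpr ⟨hk, hne⟩
      rw [hpD] at this
      simp at this
      exact hkp this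
    omega
  · have hn : 0 < arr.length := List.length_pos_of_ne_nil h
    rintro (h0 | h2)
    · -- arr is already sorted: the trivial swap (0, 0) works
      have hD : diffIdx arr s = [] := List.length_eq_zero_iff.mp h0
      have heq : arr = s := by
        apply eq_of_agree (by omega)
        intro k hk
        by_contra hne
        have : k ∈ diffIdx arr s := mem_diffIdx.mpr ⟨hk, hne⟩
        rw [hD] at this
        simp at this
      refine ⟨0, 0, le_refl 0, hn, ?_⟩
      rw [pvSwap, List.getD_eq_getElem arr 0 hn, List.set_getElem_self,
        List.set_getElem_self, heq]
    · -- exactly two mismatches: swapping them sorts the array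
      obtain ⟨p, q, hpqD⟩ := List.length_eq_two.mp h2
      have hpair := pairwise_diffIdx arr s
      rw [hpqD, List.pairwise_cons] at hpair
      have hpq : p < q := hpair.1 q (by simp)
      have hpm : p ∈ diffIdx arr s := by rw [hpqD]; simp
      have hqm : q ∈ diffIdx arr s := by rw [hpqD]; simp
      rw [mem_diffIdx] at hpm hqm
      have hagree : ∀ k, k < arr.length → k ≠ p → k ≠ q → arr.getD k 0 = s.getD k 0 := by
        intro k hk hkp hkq
        by_contra hne
        have : k ∈ diffIdx arr s := mem_diffIdx.mpr ⟨hk, hne⟩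
        rw [hpqD] at this
        simp at this
        rcases this with h' | h'
        · exact hkp h'
        · exact hkq h'
      obtain ⟨hcross1, hcross2⟩ :=
        double_diff (by omega) hperm hpq hqm.1 hagree hpm.2 hqm.2
      refine ⟨p, q, by omega, hqm.1, ?_⟩
      apply List.ext_getElem (by simp [pvSwap]; omega)
      intro k h1 h2
      have hk : k < arr.length := by simpa [pvSwap] using h1
      simp only [pvSwap, List.getElem_set]
      split_ifs with hq1 hp1
      · subst hq1
        rw [← List.getD_eq_getElem s 0 h2, ← hcross1]
      · subst hp1
        rw [← List.getD_eq_getElem s 0 h2, ← hcross2]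
      · rw [← List.getD_eq_getElem s 0 h2, ← List.getD_eq_getElem arr 0 hk]
        exact hagree k hk (Ne.symm hp1) (Ne.symm hq1)

-- ===== VERDICT (by name: the statement is the Claim_ definition above) =====
theorem solution_spec : Claim_unchanged_solution := by
  intro arr _ hnd
  exact main_ne arr hnd

theorem solution_changed : Claim_changed_solution := by
  unfold Claim_changed_solution; decide

theorem solution_tight : Claim_exact_solution := by
  intro arr _ hD
  unfold D_solution at hD
  subst hD
  decide
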